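-- pv_equiv track=rewrite | github.com/ezrasandzerbell/audiocipher-decoder | Deprecated/merged_midi_to_decoder_V2.py | segment_into_words
-- ===== SOURCE A (Python) =====
-- def segment_into_words(s, english_words, all_names, max_word_length):
--     """
--     Segments a string into all valid phrases with the fewest number of words using dynamic programming.
--
--     Args:
--         s (str): The string to segment.
--         english_words (set): Set of valid English words.
--         all_names (set): Set of valid names.
--         max_word_length (int): Maximum length of a word.
--
--     Returns:
--         list of lists or None: List of all possible word lists if segmentation is possible, else None.
--     """
--     n = len(s)
--     dp = [[] for _ in range(n + 1)]
--     dp[0] = [[]]  # Initialize with empty list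
--
--     for i in range(1, n + 1):
--         current_phrases = []
--         for j in range(max(0, i - max_word_length), i):
--             word = s[j:i]
--             if word in english_words or word in all_names:
--                 for phrase in dp[j]:
--                     current_phrases.append(phrase + [word])
--         dp[i] = current_phrases
--
--     if not dp[n]:
--         return None
--
--     # Find the minimal number of words
--     min_num_words = min(len(phrase) for phrase in dp[n])
--
--     # Collect all phrases that have the minimal number of words
--     best_phrases = [phrase for phrase in dp[n] if len(phrase) == min_num_words]
--
--     return best_phrases
-- ===== SOURCE B (Python) =====
-- def segment_into_words(s, english_words, all_names, max_word_length):
--     """Minimal-word segmentations via a min-count DP: at each position keep only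
--     the minimal word count and the phrases achieving it, instead of all segmentations."""
--     n = len(s)
--     best = [None] * (n + 1)  # best[i] = (min words to cover s[:i], list of optimal phrases) or None
--     best[0] = (0, [[]])
--     for i in range(1, n + 1):
--         entry = None
--         for j in range(max(0, i - max_word_length), i):
--             if best[j] is None:
--                 continue
--             c, phrases = best[j]
--             word = s[j:i]
--             if word in english_words or word in all_names:
--                 cand = [p + [word] for p in phrases]
--                 if entry is None or c + 1 < entry[0]:
--                     entry = (c + 1, cand)
--                 elif c + 1 == entry[0]:
--                     entry = (entry[0], entry[1] + cand)
--         best[i] = entry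
--     if best[n] is None:
--         return None
--     return best[n][1]
-- ===== Notes on version B (the rewrite author's own statement) =====
-- stated objective: alternative
-- what changed: A enumerates every possible segmentation at each position and only filters dp[n] for the minimal word count at the end; B keeps at each position only the minimal word count and the phrases achieving it, merging candidates as it scans, so non-optimal segmentations are never built.
import Mathlib
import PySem

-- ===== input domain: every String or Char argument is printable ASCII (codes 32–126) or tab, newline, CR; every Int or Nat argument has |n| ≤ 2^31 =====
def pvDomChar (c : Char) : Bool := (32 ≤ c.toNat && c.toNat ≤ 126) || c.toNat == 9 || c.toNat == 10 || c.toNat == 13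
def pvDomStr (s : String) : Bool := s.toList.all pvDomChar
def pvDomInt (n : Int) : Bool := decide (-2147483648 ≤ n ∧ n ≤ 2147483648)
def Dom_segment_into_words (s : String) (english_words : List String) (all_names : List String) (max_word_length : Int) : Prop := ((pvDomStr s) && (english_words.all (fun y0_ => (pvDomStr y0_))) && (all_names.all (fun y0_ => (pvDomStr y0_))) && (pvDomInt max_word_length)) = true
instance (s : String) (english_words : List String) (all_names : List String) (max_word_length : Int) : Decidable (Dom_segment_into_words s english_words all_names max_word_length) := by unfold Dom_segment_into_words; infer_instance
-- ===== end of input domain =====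

-- B replaces A's enumeration of ALL segmentations (then filtering the shortest) by a DP that keeps,
-- at every position, only the minimal word count and the phrases achieving it (objective: alternative).

-- ===== PORT A =====
-- inner loop body of A: for j in range(max(0, i - max_word_length), i): … (dp[i] accumulation)
def pvInnerA (s : String) (english_words : List String) (all_names : List String)
    (max_word_length : Int) (dp : List (List (List String))) (i : Int) : List (List String) :=
  (PySem.List.pyRange (max 0 (i - max_word_length)) i 1).foldl (fun cur j =>
    let word := PySem.Str.slice s (some j) (some i)
    if english_words.contains word || all_names.contains word then
      cur ++ (PySem.List.pyGetD dp j []).map (fun phrase => phrase ++ [word])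
    else cur) []

def segment_into_words (s : String) (english_words : List String) (all_names : List String) (max_word_length : Int) : Option (List (List String)) :=
  let n : Int := PySem.Str.len s
  let dp : List (List (List String)) :=
    ((PySem.List.pyRange 0 (n + 1) 1).map (fun _ => ([] : List (List String)))).set 0 [[]]
  let dp := (PySem.List.pyRange 1 (n + 1) 1).foldl
    (fun dp i => dp.set i.toNat (pvInnerA s english_words all_names max_word_length dp i)) dp
  let final := PySem.List.pyGetD dp n []
  if final.isEmpty then none
  else
    let min_num_words := (PySem.List.min? (final.map (fun phrase => (phrase.length : Int))) (fun x => x)).getD 0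
    some (final.filter (fun phrase => (phrase.length : Int) == min_num_words))

-- ===== PORT B =====
-- inner loop body of B: merge each reachable j's candidate (count, phrases) into the running optimum
def pvInnerB (s : String) (english_words : List String) (all_names : List String)
    (max_word_length : Int) (best : List (Option (Int × List (List String)))) (i : Int) :
    Option (Int × List (List String)) :=
  (PySem.List.pyRange (max 0 (i - max_word_length)) i 1).foldl (fun entry j =>
    match PySem.List.pyGetD best j none with
    | none => entry
    | some (c, phrases) =>
      let word := PySem.Str.slice s (some j) (some i)
      if english_words.contains word || all_names.contains word then
        let cand := phrases.map (fun p => p ++ [word])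
        match entry with
        | none => some (c + 1, cand)
        | some (ec, eps) =>
          if c + 1 < ec then some (c + 1, cand)
          else if c + 1 == ec then some (ec, eps ++ cand)
          else some (ec, eps)
      else entry) none

def segment_into_words_alt (s : String) (english_words : List String) (all_names : List String) (max_word_length : Int) : Option (List (List String)) :=
  let n : Int := PySem.Str.len s
  let best : List (Option (Int × List (List String))) :=
    ((PySem.List.pyRange 0 (n + 1) 1).map (fun _ => (none : Option (Int × List (List String))))).set 0 (some (0, [[]]))
  let best := (PySem.List.pyRange 1 (n + 1) 1).foldl
    (fun best i => best.set i.toNat (pvInnerB s english_words all_names max_word_length best i)) best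
  match PySem.List.pyGetD best n none with
  | none => none
  | some (_, phrases) => some phrases

-- ===== PRECONDITION & SPEC =====
def Spec_segment_into_words (s : String) (english_words : List String) (all_names : List String) (max_word_length : Int) (out : Option (List (List String))) : Prop := out = segment_into_words_alt s english_words all_names max_word_length
instance (s : String) (english_words : List String) (all_names : List String) (max_word_length : Int) (out : Option (List (List String))) : Decidable (Spec_segment_into_words s english_words all_names max_word_length out) := by unfold Spec_segment_into_words; infer_instance

-- ===== CLAIM (what is proved, stated in full; the proofs are below) =====
def Claim_equal_segment_into_words : Prop := ∀ (s : String) (english_words : List String) (all_names : List String) (max_word_length : Int), Dom_segment_into_words s english_words all_names max_word_length → Spec_segment_into_words s english_words all_names max_word_length (segment_into_words s english_words all_names max_word_length)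

-- ===== LEMMAS AND PROOFS =====

-- the abstraction: from a list of phrases, its minimal length together with the phrases of that length
def pvMerge (x y : Option (Int × List (List String))) : Option (Int × List (List String)) :=
  match x, y with
  | none, y => y
  | some e, none => some e
  | some (c1, p1), some (c2, p2) =>
    if c2 < c1 then some (c2, p2)
    else if c2 = c1 then some (c1, p1 ++ p2)
    else some (c1, p1)

def pvToOpt : List (List String) → Option (Int × List (List String))
  | [] => none
  | p :: rest => pvMerge (some ((p.length : Int), [p])) (pvToOpt rest)

lemma pvMerge_none_right (x : Option (Int × List (List String))) : pvMerge x none = x := by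
  cases x <;> rfl

lemma pvMerge_assoc (a b c : Option (Int × List (List String))) :
    pvMerge (pvMerge a b) c = pvMerge a (pvMerge b c) := by
  rcases a with _ | ⟨ca, pa⟩ <;> rcases b with _ | ⟨cb, pb⟩ <;> rcases c with _ | ⟨cc, pc⟩ <;>
    (repeat' first | split_ifs | simp only [pvMerge]) <;>
    first | rfl | (exfalso; omega) | (simp_all [List.append_assoc])

lemma pvToOpt_append (l1 l2 : List (List String)) :
    pvToOpt (l1 ++ l2) = pvMerge (pvToOpt l1) (pvToOpt l2) := by
  induction l1 with
  | nil => rfl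
  | cons p rest ih => simp only [List.cons_append, pvToOpt, ih, pvMerge_assoc]

lemma pvMerge_map_shift (w : String) (a b : Option (Int × List (List String))) :
    (pvMerge a b).map (fun e => (e.1 + 1, e.2.map (fun p => p ++ [w]))) =
      pvMerge (a.map (fun e => (e.1 + 1, e.2.map (fun p => p ++ [w]))))
        (b.map (fun e => (e.1 + 1, e.2.map (fun p => p ++ [w])))) := by
  rcases a with _ | ⟨ca, pa⟩ <;> rcases b with _ | ⟨cb, pb⟩ <;>
    (repeat' first | split_ifs | simp only [Option.map, pvMerge]) <;>
    first | rfl | (exfalso; omega) | simp_all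

lemma pvToOpt_map_snoc (w : String) (l : List (List String)) :
    pvToOpt (l.map (fun p => p ++ [w])) =
      (pvToOpt l).map (fun e => (e.1 + 1, e.2.map (fun p => p ++ [w]))) := by
  induction l with
  | nil => rfl
  | cons p rest ih =>
    simp only [List.map_cons, pvToOpt, ih]
    have hh : (some (((p ++ [w]).length : Int), [p ++ [w]])) =
        (some ((p.length : Int), [p])).map
          (fun e => (e.1 + 1, e.2.map (fun q => q ++ [w]))) := by
      simp [List.length_append]
    rw [hh, ← pvMerge_map_shift]

-- B's running-optimum update IS pvMerge with the candidate
lemma pvStepB_eq_merge (c : Int) (cand : List (List String))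
    (entry : Option (Int × List (List String))) :
    (match entry with
      | none => some (c + 1, cand)
      | some (ec, eps) =>
        if c + 1 < ec then some (c + 1, cand)
        else if c + 1 == ec then some (ec, eps ++ cand)
        else some (ec, eps)) = pvMerge entry (some (c + 1, cand)) := by
  rcases entry with _ | ⟨ec, eps⟩
  · rfl
  · simp only [pvMerge, beq_iff_eq]

-- the inner loops agree: B's fold over j computes pvToOpt of A's fold over j
lemma pvInner_eq (s : String) (english_words all_names : List String) (max_word_length : Int)
    (dp : List (List (List String))) (i : Int) :
    pvInnerB s english_words all_names max_word_length (dp.map pvToOpt) i =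
      pvToOpt (pvInnerA s english_words all_names max_word_length dp i) := by
  unfold pvInnerA pvInnerB
  generalize PySem.List.pyRange (max 0 (i - max_word_length)) i 1 = js
  suffices h : ∀ (js : List Int) (cur : List (List String)),
      js.foldl (fun entry j =>
        match PySem.List.pyGetD (dp.map pvToOpt) j none with
        | none => entry
        | some (c, phrases) =>
          let word := PySem.Str.slice s (some j) (some i)
          if english_words.contains word || all_names.contains word then
            let cand := phrases.map (fun p => p ++ [word])
            match entry with
            | none => some (c + 1, cand)
            | some (ec, eps) =>
              if c + 1 < ec then some (c + 1, cand)
              else if c + 1 == ec then some (ec, eps ++ cand)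
              else some (ec, eps)
          else entry) (pvToOpt cur) =
      pvToOpt (js.foldl (fun cur j =>
        let word := PySem.Str.slice s (some j) (some i)
        if english_words.contains word || all_names.contains word then
          cur ++ (PySem.List.pyGetD dp j []).map (fun phrase => phrase ++ [word])
        else cur) cur) by
    simpa using h js []
  intro js
  induction js with
  | nil => intro cur; rfl
  | cons j js ih =>
    intro cur
    simp only [List.foldl_cons]
    have hget : PySem.List.pyGetD (dp.map pvToOpt) j none = pvToOpt (PySem.List.pyGetD dp j []) := by
      exact PySem.List.pyGetD_map pvToOpt dp j []
    rw [hget]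
    rcases hcase : pvToOpt (PySem.List.pyGetD dp j []) with _ | ⟨c, phrases⟩
    · -- unreachable position: contributes nothing on either side
      by_cases hv : (english_words.contains (PySem.Str.slice s (some j) (some i)) ||
          all_names.contains (PySem.Str.slice s (some j) (some i))) = true
      · simp only [hv, if_pos]
        have : pvToOpt (cur ++ (PySem.List.pyGetD dp j []).map
            (fun phrase => phrase ++ [PySem.Str.slice s (some j) (some i)])) = pvToOpt cur := by
          rw [pvToOpt_append, pvToOpt_map_snoc, hcase]
          exact pvMerge_none_right _
        rw [← this] at *
        exact ih _
      · simp only [Bool.not_eq_true] at hv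
        simp only [hv, if_neg, Bool.false_eq_true, not_false_iff]
        exact ih cur
    · by_cases hv : (english_words.contains (PySem.Str.slice s (some j) (some i)) ||
          all_names.contains (PySem.Str.slice s (some j) (some i))) = true
      · simp only [hv, if_pos]
        rw [pvStepB_eq_merge]
        have hmap : pvToOpt ((PySem.List.pyGetD dp j []).map
            (fun phrase => phrase ++ [PySem.Str.slice s (some j) (some i)])) =
            some (c + 1, phrases.map (fun p => p ++ [PySem.Str.slice s (some j) (some i)])) := by
          rw [pvToOpt_map_snoc, hcase]; rfl
        have : pvMerge (pvToOpt cur)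
            (some (c + 1, phrases.map (fun p => p ++ [PySem.Str.slice s (some j) (some i)]))) =
            pvToOpt (cur ++ (PySem.List.pyGetD dp j []).map
              (fun phrase => phrase ++ [PySem.Str.slice s (some j) (some i)])) := by
          rw [pvToOpt_append, hmap]
        rw [this]
        exact ih _
      · simp only [Bool.not_eq_true] at hv
        simp only [hv, if_neg, Bool.false_eq_true, not_false_iff]
        exact ih cur

-- the outer loops agree: B's table is the image of A's table under pvToOpt, throughout
lemma pvOuter_eq (s : String) (english_words all_names : List String) (max_word_length : Int)
    (is : List Int) :
    ∀ (dp : List (List (List String))),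
      is.foldl (fun best i => best.set i.toNat (pvInnerB s english_words all_names max_word_length best i)) (dp.map pvToOpt) =
        (is.foldl (fun dp i => dp.set i.toNat (pvInnerA s english_words all_names max_word_length dp i)) dp).map pvToOpt := by
  induction is with
  | nil => intro dp; rfl
  | cons i is ih =>
    intro dp
    simp only [List.foldl_cons]
    rw [pvInner_eq, ← List.map_set, ih]

lemma pvToOpt_eq_none_iff (l : List (List String)) : pvToOpt l = none ↔ l = [] := by
  cases l with
  | nil => simp [pvToOpt]
  | cons p rest =>
    simp only [pvToOpt]
    constructor
    · intro h
      exfalso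
      rcases hr : pvToOpt rest with _ | ⟨cr, pr⟩
      · rw [hr] at h; simp [pvMerge] at h
      · rw [hr] at h; simp only [pvMerge] at h; split_ifs at h
    · intro h; simp at h

lemma pvToOpt_spec (l : List (List String)) (m : Int) (ps : List (List String))
    (h : pvToOpt l = some (m, ps)) :
    (∀ p ∈ l, m ≤ (p.length : Int)) ∧
    ps = l.filter (fun p => (p.length : Int) == m) ∧
    (∃ p ∈ l, (p.length : Int) = m) := by
  induction l generalizing m ps with
  | nil => simp [pvToOpt] at h
  | cons p rest ih =>
    simp only [pvToOpt] at h
    rcases hr : pvToOpt rest with _ | ⟨mr, pr⟩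
    · rw [hr] at h
      simp only [pvMerge, Option.some.injEq, Prod.mk.injEq] at h
      obtain ⟨hm, hps⟩ := h
      have hrest : rest = [] := (pvToOpt_eq_none_iff rest).mp hr
      subst hrest hm hps
      refine ⟨by simp, by simp, p, by simp⟩
    · rw [hr] at h
      obtain ⟨hbound, hfilt, q, hq, hqm⟩ := ih mr pr hr
      simp only [pvMerge] at h
      split_ifs at h with h1 h2
      · -- mr < p.length : the earlier phrase p is not minimal
        simp only [Option.some.injEq, Prod.mk.injEq] at h
        obtain ⟨hm, hps⟩ := h
        subst hm; subst hps
        refine ⟨?_, ?_, q, List.mem_cons_of_mem _ hq, hqm⟩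
        · intro x hx
          rcases List.mem_cons.mp hx with rfl | hx
          · omega
          · exact hbound x hx
        · rw [List.filter_cons]
          have : ¬ ((p.length : Int) == mr) = true := by simp only [beq_iff_eq]; omega
          simp only [this, if_neg, Bool.false_eq_true, not_false_iff]
          exact hfilt
      · -- tie: p joins the minimal phrases of rest
        simp only [Option.some.injEq, Prod.mk.injEq] at h
        obtain ⟨hm, hps⟩ := h
        subst hm; subst hps
        refine ⟨?_, ?_, p, List.mem_cons_self .., by omega⟩
        · intro x hx
          rcases List.mem_cons.mp hx with rfl | hx
          · omega
          · have := hbound x hx; omega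
        · rw [List.filter_cons]
          have : ((p.length : Int) == (p.length : Int)) = true := by simp
          simp only [this, if_pos]
          rw [List.singleton_append]
          congr 1
          rw [hfilt, h2]
      · -- p is strictly shorter: it alone is minimal, rest contributes nothing
        simp only [Option.some.injEq, Prod.mk.injEq] at h
        obtain ⟨hm, hps⟩ := h
        subst hm; subst hps
        refine ⟨?_, ?_, p, List.mem_cons_self .., rfl⟩
        · intro x hx
          rcases List.mem_cons.mp hx with rfl | hx
          · omega
          · have := hbound x hx; omega
        · rw [List.filter_cons]
          have : ((p.length : Int) == (p.length : Int)) = true := by simp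
          simp only [this, if_pos]
          have hnil : rest.filter (fun x => ((x.length : Int) == (p.length : Int))) = [] := by
            rw [List.filter_eq_nil_iff]
            intro x hx
            have := hbound x hx
            simp only [beq_iff_eq]
            omega
          rw [hnil]

-- A's min(len(phrase) …) equals the count pvToOpt carries
lemma pvMin_eq (l : List (List String)) (m : Int) (ps : List (List String))
    (h : pvToOpt l = some (m, ps)) :
    (PySem.List.min? (l.map (fun phrase => (phrase.length : Int))) (fun x => x)).getD 0 = m := by
  obtain ⟨hbound, _, q, hq, hqm⟩ := pvToOpt_spec l m ps h
  rcases hmin : PySem.List.min? (l.map (fun phrase => (phrase.length : Int))) (fun x => x) with _ | μ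
  · rw [PySem.List.min?_eq_none_iff] at hmin
    simp only [List.map_eq_nil_iff] at hmin
    subst hmin; simp [pvToOpt] at h
  · have hμmem := PySem.List.min?_mem hmin
    have hμmin := PySem.List.min?_isMin hmin
    rw [hmin]
    simp only [Option.getD_some]
    have h1 : μ ≤ m := by
      have := hμmin ((q.length : Int)) (List.mem_map_of_mem hq)
      omega
    have h2 : m ≤ μ := by
      obtain ⟨x, hx, hxe⟩ := List.mem_map.mp hμmem
      have := hbound x hx
      omega
    omega

-- ===== VERDICT (by name: the statement is the Claim_ definition above) =====
theorem segment_into_words_spec : Claim_equal_segment_into_words := by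
  intro s english_words all_names max_word_length _
  simp only [Spec_segment_into_words, segment_into_words, segment_into_words_alt]
  have hinit : ((PySem.List.pyRange 0 (PySem.Str.len s + 1) 1).map
      (fun _ => (none : Option (Int × List (List String))))).set 0 (some (0, [[]])) =
      (((PySem.List.pyRange 0 (PySem.Str.len s + 1) 1).map
        (fun _ => ([] : List (List String)))).set 0 [[]]).map pvToOpt := by
    rw [List.map_set, List.map_map]
    rfl
  rw [hinit, pvOuter_eq]
  generalize (PySem.List.pyRange 1 (PySem.Str.len s + 1) 1).foldl
      (fun dp i => dp.set i.toNat (pvInnerA s english_words all_names max_word_length dp i))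
      (((PySem.List.pyRange 0 (PySem.Str.len s + 1) 1).map
        (fun _ => ([] : List (List String)))).set 0 [[]]) = dp
  have hget : PySem.List.pyGetD (dp.map pvToOpt) (PySem.Str.len s) none =
      pvToOpt (PySem.List.pyGetD dp (PySem.Str.len s) []) := by
    exact PySem.List.pyGetD_map pvToOpt dp (PySem.Str.len s) []
  rw [hget]
  generalize PySem.List.pyGetD dp (PySem.Str.len s) [] = final
  rcases hfin : pvToOpt final with _ | ⟨m, ps⟩
  · have : final = [] := (pvToOpt_eq_none_iff final).mp hfin
    subst this
    simp
  · have hne : final ≠ [] := by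
      intro h; subst h; simp [pvToOpt] at hfin
    have hempty : final.isEmpty = false := by
      simpa [List.isEmpty_iff] using hne
    rw [hempty]
    simp only [Bool.false_eq_true, if_neg, not_false_iff]
    rw [pvMin_eq final m ps hfin]
    obtain ⟨_, hfilt, _⟩ := pvToOpt_spec final m ps hfin
    rw [← hfilt]
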